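-- pv_equiv track=rewrite | github.com/alexapvl/Babes-Bolyai-University | Semester5/PKC/Labs/lab5/mceliece.py | ciphertext_to_hex
-- ===== SOURCE A (Python) =====
-- from typing import List, Tuple, Optional
--
-- def ciphertext_to_hex(ciphertext_blocks: List[List[int]]) -> str:
--     """Convert ciphertext blocks to a hexadecimal string for display."""
--     hex_parts = []
--     for block in ciphertext_blocks:
--         # Convert bit list to integer
--         value = 0
--         for bit in block:
--             value = (value << 1) | bit
--         hex_parts.append(format(value, 'x').zfill((len(block) + 3) // 4))
--     return ' '.join(hex_parts)
-- ===== SOURCE B (Python) =====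
-- def ciphertext_to_hex(ciphertext_blocks):
--     """Convert ciphertext blocks to a hexadecimal string for display."""
--     def pack(bits):
--         # Balanced divide-and-conquer: shifting distributes over bitwise or,
--         # so packing the two halves and combining gives the block's value.
--         n = len(bits)
--         if n == 0:
--             return 0
--         if n == 1:
--             return bits[0]
--         mid = n // 2
--         return (pack(bits[:mid]) << (n - mid)) | pack(bits[mid:])
--     return ' '.join(format(pack(block), 'x').zfill((len(block) + 3) // 4)
--                     for block in ciphertext_blocks)
-- ===== Notes on version B (the rewrite author's own statement) =====
-- stated objective: alternative
-- what changed: B packs each block by balanced divide-and-conquer (recursively pack the two halves, then combine them with one shift-or, valid because shifting distributes over bitwise or) instead of A's linear shift-accumulate over every bit; the hex rendering (format + zfill) is unchanged.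
import Mathlib
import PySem

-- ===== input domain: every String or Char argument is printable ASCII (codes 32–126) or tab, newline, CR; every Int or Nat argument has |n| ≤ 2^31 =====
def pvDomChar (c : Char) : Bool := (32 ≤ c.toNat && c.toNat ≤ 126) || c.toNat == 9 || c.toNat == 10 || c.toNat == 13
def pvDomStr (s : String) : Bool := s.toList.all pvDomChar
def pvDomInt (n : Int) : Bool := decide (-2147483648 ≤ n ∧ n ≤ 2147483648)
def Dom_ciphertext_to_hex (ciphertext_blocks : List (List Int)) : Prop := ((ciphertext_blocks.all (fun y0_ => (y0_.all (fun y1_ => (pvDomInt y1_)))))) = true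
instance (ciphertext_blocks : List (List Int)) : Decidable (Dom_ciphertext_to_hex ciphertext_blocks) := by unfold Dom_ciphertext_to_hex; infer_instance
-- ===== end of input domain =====

-- B packs each block by balanced divide-and-conquer (shift-or of the two packed halves)
-- instead of A's linear shift-accumulate over every bit; rendering is unchanged.


-- ===== PORT A =====
-- format(n, 'x') has no PySem primitive, so it is ported by hand, exact for every Int:
-- lowercase hex digits of |n|, '-' prefixed for negative n (fuel n+1 suffices, the
-- argument is divided by 16 each step).
def pvHexAux : Nat → Nat → List Char
  | 0, _ => []
  | fuel + 1, n =>
      if n < 16 then [Nat.digitChar n]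
      else pvHexAux fuel (n / 16) ++ [Nat.digitChar (n % 16)]

def pvHexNat (n : Nat) : List Char := pvHexAux (n + 1) n

def pvFormatHex (v : Int) : List Char :=
  if v < 0 then '-' :: pvHexNat (-v).toNat else pvHexNat v.toNat

def ciphertext_to_hex (ciphertext_blocks : List (List Int)) : String :=
  let hex_parts := ciphertext_blocks.foldl (fun acc block =>
    let value := block.foldl (fun v bit => PySem.Int.bor (v <<< (1 : Nat)) bit) 0
    acc ++ [String.ofList (PySem.Chars.zfill (pvFormatHex value)
                             (PySem.Int.floordiv ((block.length : Int) + 3) 4))]) []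
  PySem.Str.join " " hex_parts

-- ===== PORT B =====
-- Source B's pack: balanced divide-and-conquer over the two half slices.
-- Fuel bits.length suffices: each recursive call is on a strictly shorter slice.
-- The shift count n - mid is >= 0 (mid = n // 2 <= n), so '.toNat' is exact there;
-- bits[0] is in range in its branch (n = 1), so pyGetD is exact there.
def pvPackAux : Nat → List Int → Int
  | 0, _ => 0
  | fuel + 1, bits =>
      if bits.length = 0 then 0
      else if bits.length = 1 then PySem.List.pyGetD bits 0 0
      else
        let mid := PySem.Int.floordiv (bits.length : Int) 2
        PySem.Int.bor
          (pvPackAux fuel (PySem.List.slice bits none (some mid)) <<< (((bits.length : Int) - mid).toNat))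
          (pvPackAux fuel (PySem.List.slice bits (some mid) none))

def pvPack (bits : List Int) : Int := pvPackAux bits.length bits

def ciphertext_to_hex_alt (ciphertext_blocks : List (List Int)) : String :=
  PySem.Str.join " " (ciphertext_blocks.map (fun block =>
    String.ofList (PySem.Chars.zfill (pvFormatHex (pvPack block))
                     (PySem.Int.floordiv ((block.length : Int) + 3) 4))))

-- ===== PRECONDITION & SPEC =====
def Spec_ciphertext_to_hex (ciphertext_blocks : List (List Int)) (out : String) : Prop :=
  out = ciphertext_to_hex_alt ciphertext_blocks
instance (ciphertext_blocks : List (List Int)) (out : String) : Decidable (Spec_ciphertext_to_hex ciphertext_blocks out) := by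
  unfold Spec_ciphertext_to_hex; infer_instance

-- ===== CLAIM (what is proved, stated in full; the proofs are below) =====
def Claim_equal_ciphertext_to_hex : Prop := ∀ (ciphertext_blocks : List (List Int)), Dom_ciphertext_to_hex ciphertext_blocks → Spec_ciphertext_to_hex ciphertext_blocks (ciphertext_to_hex ciphertext_blocks)

-- ===== LEMMAS AND PROOFS =====

-- ---- Python bitwise-or is Mathlib's Int.lor ----
theorem pvOrAddDisjoint : ∀ x y : Nat, x &&& y = 0 → x ||| y = x + y := by
  intro x
  induction x using Nat.binaryRec with
  | zero => simp
  | bit b n ih =>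
      intro y h
      rw [← Nat.bit_testBit_zero_shiftRight_one y] at h ⊢
      rw [Nat.lor_bit]
      rw [Nat.land_bit, Nat.bit_eq_zero_iff] at h
      obtain ⟨h1, h2⟩ := h
      rw [ih _ h1]
      cases b <;> cases hy : Nat.testBit y 0 <;> simp [hy, Nat.bit] at h2 ⊢ <;> omega

theorem pvSubAndEqLdiff (y a : Nat) : y - (y &&& a) = Nat.ldiff y a := by
  have hle : y &&& a ≤ y := Nat.and_le_left
  have hdisj : Nat.ldiff y a &&& (y &&& a) = 0 := by
    apply Nat.eq_of_testBit_eq; intro i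
    simp only [Nat.testBit_land, Nat.testBit_ldiff, Nat.zero_testBit]
    cases Nat.testBit y i <;> cases Nat.testBit a i <;> simp
  have hor : Nat.ldiff y a ||| (y &&& a) = y := by
    apply Nat.eq_of_testBit_eq; intro i
    simp only [Nat.testBit_lor, Nat.testBit_land, Nat.testBit_ldiff]
    cases Nat.testBit y i <;> cases Nat.testBit a i <;> simp
  have := pvOrAddDisjoint _ _ hdisj
  omega

theorem pvBorEqLor (a b : Int) : PySem.Int.bor a b = Int.lor a b := by
  unfold PySem.Int.bor Int.lor
  rcases a with a | a <;> rcases b with b | b <;>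
    simp [pvSubAndEqLdiff, Int.negSucc_eq,
          show ∀ m : Nat, ¬((m : Int) ≤ -1) from fun m => by omega] <;>
    omega

-- ---- Int.lor toolkit ----
theorem pvLorZero (x : Int) : Int.lor x 0 = x := by
  rcases x with m | m
  · simp [Int.lor]
  · simp [Int.lor]
    apply Nat.eq_of_testBit_eq; intro i; simp [Nat.testBit_ldiff]

theorem pvZeroLor (x : Int) : Int.lor 0 x = x := by
  rcases x with m | m
  · simp [Int.lor]
  · simp [Int.lor]
    apply Nat.eq_of_testBit_eq; intro i; simp [Nat.testBit_ldiff]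

theorem pvLorAssoc (x y z : Int) : Int.lor (Int.lor x y) z = Int.lor x (Int.lor y z) := by
  rcases x with a | a <;> rcases y with b | b <;> rcases z with c | c <;>
    simp only [Int.lor] <;> congr 1 <;>
    (apply Nat.eq_of_testBit_eq; intro i
     simp only [Nat.testBit_ldiff, Nat.testBit_lor, Nat.testBit_land]
     cases Nat.testBit a i <;> cases Nat.testBit b i <;> cases Nat.testBit c i <;> rfl)

theorem pvLorMulTwo (x y : Int) : Int.lor x y * 2 = Int.lor (x * 2) (y * 2) := by
  have h := Int.lor_bit false x false y
  simpa [Int.bit_val, mul_comm] using h.symm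

theorem pvLorMulPow (n : Nat) (x y : Int) :
    Int.lor x y * 2 ^ n = Int.lor (x * 2 ^ n) (y * 2 ^ n) := by
  induction n with
  | zero => simp
  | succ k ih =>
      rw [pow_succ, ← mul_assoc, ih, pvLorMulTwo, mul_assoc, mul_assoc, ← pow_succ]

theorem pvLorShift (n : Nat) (x y : Int) :
    Int.lor x y <<< n = Int.lor (x <<< n) (y <<< n) := by
  rw [Int.shiftLeft_eq, Int.shiftLeft_eq, Int.shiftLeft_eq]
  exact pvLorMulPow n x y

theorem pvShiftShift (x : Int) (a b : Nat) : (x <<< a) <<< b = x <<< (a + b) := by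
  rw [Int.shiftLeft_eq, Int.shiftLeft_eq, Int.shiftLeft_eq, pow_add]
  ring

theorem pvShiftZero (x : Int) : x <<< (0 : Nat) = x := by
  rw [Int.shiftLeft_eq]; ring

theorem pvZeroShift (n : Nat) : (0 : Int) <<< n = 0 := by
  rw [Int.shiftLeft_eq]; ring

-- ---- the block value as an OR of position-shifted bits ----
def pvOrS : List Int → Int
  | [] => 0
  | x :: t => Int.lor (x <<< t.length) (pvOrS t)

-- A's shift-accumulate fold computes pvOrS
theorem pvFoldA (bits : List Int) : ∀ a : Int,
    bits.foldl (fun v bit => PySem.Int.bor (v <<< (1 : Nat)) bit) a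
      = Int.lor (a <<< bits.length) (pvOrS bits) := by
  induction bits with
  | nil => intro a; simp [pvOrS, pvLorZero, Int.shiftLeft_eq]
  | cons x t ih =>
      intro a
      have hshift : (a <<< (1 : Nat)) <<< t.length = a <<< (t.length + 1) := by
        rw [pvShiftShift, Nat.add_comm]
      calc (x :: t).foldl (fun v bit => PySem.Int.bor (v <<< (1 : Nat)) bit) a
      _ = t.foldl (fun v bit => PySem.Int.bor (v <<< (1 : Nat)) bit)
            (PySem.Int.bor (a <<< (1 : Nat)) x) := rfl
      _ = Int.lor ((PySem.Int.bor (a <<< (1 : Nat)) x) <<< t.length) (pvOrS t) := ih _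
      _ = Int.lor (a <<< (t.length + 1)) (Int.lor (x <<< t.length) (pvOrS t)) := by
            rw [pvBorEqLor, pvLorShift, pvLorAssoc, hshift]
            
      _ = Int.lor (a <<< (x :: t).length) (pvOrS (x :: t)) := by
            simp [pvOrS]

-- pvOrS splits over a concatenation (the divide-and-conquer combine step)
theorem pvOrS_append (xs ys : List Int) :
    pvOrS (xs ++ ys) = Int.lor (pvOrS xs <<< ys.length) (pvOrS ys) := by
  induction xs with
  | nil => rw [List.nil_append, pvOrS, pvZeroShift, pvZeroLor]
  | cons x t ih =>
      rw [List.cons_append, pvOrS, pvOrS, ih, pvLorShift, pvLorAssoc, pvShiftShift,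
          List.length_append]

-- B's pack computes pvOrS
theorem pvPackAux_eq_orS (fuel : Nat) : ∀ bits : List Int, bits.length ≤ fuel → pvPackAux fuel bits = pvOrS bits := by
  induction fuel with
  | zero =>
      intro bits h
      have : bits = [] := List.eq_nil_of_length_eq_zero (by omega)
      subst this; rfl
  | succ m ih =>
      intro bits hlen
      rw [pvPackAux]
      by_cases h0 : bits.length = 0
      · have : bits = [] := List.eq_nil_of_length_eq_zero h0
        subst this; rfl
      · rw [if_neg h0]
        by_cases h1 : bits.length = 1
        · rw [if_pos h1]
          match bits, h1 with
          | [b], _ =>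
            rw [PySem.List.pyGetD_zero_cons, pvOrS, pvOrS, List.length_nil, pvShiftZero,
                pvLorZero]
        · rw [if_neg h1]
          have hmid : PySem.Int.floordiv (bits.length : Int) 2 = ((bits.length / 2 : Nat) : Int) := by
            exact_mod_cast PySem.Int.floordiv_natCast bits.length 2
          simp only [hmid, PySem.List.slice_to_natCast, PySem.List.slice_from_natCast]
          have hlt : bits.length / 2 ≤ bits.length := Nat.div_le_self _ _
          rw [ih (bits.take (bits.length / 2)) (by rw [List.length_take]; omega),
              ih (bits.drop (bits.length / 2)) (by rw [List.length_drop]; omega)]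
          have hsh : (((bits.length : Int) - ((bits.length / 2 : Nat) : Int)).toNat)
              = (bits.drop (bits.length / 2)).length := by
            rw [List.length_drop]; omega
          rw [hsh, pvBorEqLor, ← pvOrS_append, List.take_append_drop]

theorem pvPack_eq_orS (bits : List Int) : pvPack bits = pvOrS bits :=
  pvPackAux_eq_orS bits.length bits le_rfl

-- per-block value equality
theorem pvBlockVal (block : List Int) :
    block.foldl (fun v bit => PySem.Int.bor (v <<< (1 : Nat)) bit) 0 = pvPack block := by
  rw [pvFoldA block 0, pvZeroShift, pvZeroLor, pvPack_eq_orS block]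

-- ===== VERDICT (by name: the statement is the Claim_ definition above) =====
theorem ciphertext_to_hex_spec : Claim_equal_ciphertext_to_hex := by
  intro blocks _
  unfold Spec_ciphertext_to_hex ciphertext_to_hex ciphertext_to_hex_alt
  simp only [PySem.List.foldl_append_singleton_eq_map, List.nil_append]
  congr 1
  apply List.map_congr_left
  intro block _
  rw [pvBlockVal]
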